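-- pv_equiv track=rewrite | github.com/NesjaCode/advent-of-code-2021 | python/day_12/part_2.py | chech_valid_lower
-- ===== SOURCE A (Python) =====
-- def chech_valid_lower(path, cave):
--     counter = 0
--     doubles = False
--     seen = set()
--     for i in path:
--         if i.islower() and i != 'start':
--             if i == cave:
--                 counter += 1
--             if i in seen:
--                 doubles = True
--             seen.add(i)
--     if counter == 0 or (counter == 1 and not doubles):
--         return True
--     return False
-- ===== SOURCE B (Python) =====
-- def chech_valid_lower(path, cave):
--     counts = {}
--     for i in path:
--         if i.islower() and i != 'start':
--             counts[i] = counts.get(i, 0) + 1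
--     return cave not in counts or all(v == 1 for v in counts.values())
-- ===== Notes on version B (the rewrite author's own statement) =====
-- stated objective: alternative
-- what changed: B builds a frequency table (dict histogram) of the qualifying lowercase non-'start' caves in one pass and then decides by two aggregate queries (is cave a key; are all counts 1), replacing A's incremental counter/doubles/seen flag machinery.
import Mathlib
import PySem

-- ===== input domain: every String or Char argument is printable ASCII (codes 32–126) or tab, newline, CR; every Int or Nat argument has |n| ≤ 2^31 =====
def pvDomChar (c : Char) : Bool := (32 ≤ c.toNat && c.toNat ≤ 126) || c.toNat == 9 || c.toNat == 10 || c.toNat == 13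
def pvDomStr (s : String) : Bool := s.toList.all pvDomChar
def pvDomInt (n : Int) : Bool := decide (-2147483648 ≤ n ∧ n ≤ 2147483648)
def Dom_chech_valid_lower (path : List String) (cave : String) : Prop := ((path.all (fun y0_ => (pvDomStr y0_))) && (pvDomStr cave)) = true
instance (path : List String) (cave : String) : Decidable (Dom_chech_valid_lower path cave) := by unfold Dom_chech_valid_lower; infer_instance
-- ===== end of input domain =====

-- B replaces A's incremental counter/doubles/seen flags by a dict histogram plus two aggregate queries; return values are identical.

-- Python's s.islower(): at least one cased character and no uppercase cased character — exact on the
-- ASCII domain, where the cased characters are exactly 'a'-'z' (islower) and 'A'-'Z' (isupper).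
def pyStrIslower (s : String) : Bool :=
  s.toList.any PySem.Str.islower && s.toList.all (fun c => !PySem.Str.isupper c)

-- ===== PORT A =====
-- the body of A's loop (the branch taken when i qualifies)
def pvStepA (cave : String) (st : Int × Bool × PySem.Set String) (i : String) :
    Int × Bool × PySem.Set String :=
  let c := if i == cave then st.1 + 1 else st.1
  let d := if PySem.Set.contains st.2.2 i then true else st.2.1
  (c, d, PySem.Set.add st.2.2 i)

def chech_valid_lower (path : List String) (cave : String) : Bool :=
  let st := path.foldl
    (fun st i => if pyStrIslower i && !(i == "start") then pvStepA cave st i else st)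
    ((0 : Int), false, (PySem.Set.empty : PySem.Set String))
  if st.1 == 0 || (st.1 == 1 && !st.2.1) then true else false

-- ===== PORT B =====
def chech_valid_lower_alt (path : List String) (cave : String) : Bool :=
  let counts := path.foldl
    (fun (d : PySem.Dict String Int) i =>
      if pyStrIslower i && !(i == "start") then d.insert i (d.getD i 0 + 1) else d)
    PySem.Dict.empty
  !(counts.contains cave) || counts.values.all (fun v => v == 1)

-- ===== PRECONDITION & SPEC =====
def Spec_chech_valid_lower (path : List String) (cave : String) (out : Bool) : Prop := out = chech_valid_lower_alt path cave
instance (path : List String) (cave : String) (out : Bool) : Decidable (Spec_chech_valid_lower path cave out) := by unfold Spec_chech_valid_lower; infer_instance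

-- ===== CLAIM (what is proved, stated in full; the proofs are below) =====
def Claim_equal_chech_valid_lower : Prop := ∀ (path : List String) (cave : String), Dom_chech_valid_lower path cave → Spec_chech_valid_lower path cave (chech_valid_lower path cave)

-- ===== LEMMAS AND PROOFS =====

-- A's loop over the qualifying elements computes: the count of cave, the duplicate flag, the seen set.
theorem foldA_char (cave : String) (l : List String) :
    l.foldl (pvStepA cave) ((0 : Int), false, (PySem.Set.empty : PySem.Set String)) =
      (((l.count cave : Nat) : Int), !decide l.Nodup, PySem.Set.ofList l) := by
  induction l using List.reverseRecOn with
  | nil => simp [PySem.Set.empty]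
  | append_singleton l x ih =>
      rw [List.foldl_append, ih]
      unfold pvStepA
      refine Prod.ext ?_ (Prod.ext ?_ ?_)
      · simp only [List.count_append, List.count_singleton]
        by_cases h : x = cave
        · subst h; simp
        · simp [h, beq_iff_eq]
      · by_cases h : x ∈ l
        · have h2 : ¬ (l ++ [x]).Nodup := by
            intro hn
            have h1 := List.nodup_iff_count_le_one.mp hn x
            rw [List.count_append] at h1
            have h3 := List.count_pos_iff.mpr h
            simp at h1
            omega
          simp [PySem.Set.mem_ofList, h, h2]
        · have h2 : (l ++ [x]).Nodup ↔ l.Nodup := by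
            constructor
            · intro hn; exact (List.nodup_append.mp hn).1
            · intro hn
              rw [List.nodup_append]
              refine ⟨hn, List.nodup_singleton x, fun a ha b hb => ?_⟩
              rw [List.mem_singleton] at hb
              subst hb
              exact fun e => h (e ▸ ha)
          simp [PySem.Set.mem_ofList, h, h2]
      · exact (PySem.Set.ofList_append_singleton l x).symm

-- list-level restatement of the decision: A's 'count==0 or (count==1 and no doubles)' equals
-- B's 'cave not a key, or every histogram value is 1'
theorem pv_key (qual : List String) (cave : String) :
    (qual.count cave = 0 ∨ (qual.count cave = 1 ∧ qual.Nodup)) ↔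
      (cave ∉ qual ∨ ∀ k ∈ qual, qual.count k = 1) := by
  constructor
  · rintro (h0 | ⟨h1, hnd⟩)
    · exact Or.inl (List.count_eq_zero.mp h0)
    · refine Or.inr (fun k hk => ?_)
      have h2 := List.nodup_iff_count_le_one.mp hnd k
      have h3 := List.count_pos_iff.mpr hk
      omega
  · rintro (hnm | hall)
    · exact Or.inl (List.count_eq_zero.mpr hnm)
    · by_cases hm : cave ∈ qual
      · refine Or.inr ⟨hall cave hm, List.nodup_iff_count_le_one.mpr (fun k => ?_)⟩
        by_cases hk : k ∈ qual
        · exact le_of_eq (hall k hk)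
        · simp [List.count_eq_zero.mpr hk]
      · exact Or.inl (List.count_eq_zero.mpr hm)

theorem chech_valid_lower_eq (path : List String) (cave : String) :
    chech_valid_lower path cave = chech_valid_lower_alt path cave := by
  unfold chech_valid_lower chech_valid_lower_alt
  rw [← List.foldl_filter, ← List.foldl_filter]
  set qual := path.filter (fun i => pyStrIslower i && !(i == "start")) with hq
  rw [foldA_char, PySem.Dict.foldl_insert_getD_add_one_eq_counter]
  simp only [PySem.Dict.contains_counter, PySem.Dict.values,
    PySem.Dict.items_counter, List.map_map]
  rw [Bool.eq_iff_iff]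
  have hL : ((if ((((qual.count cave : Nat) : Int) == 0 ||
        (((qual.count cave : Nat) : Int) == 1 && !(!decide qual.Nodup))))
        then true else false) = true) ↔
      (qual.count cave = 0 ∨ (qual.count cave = 1 ∧ qual.Nodup)) := by
    simp
  rw [hL, pv_key]
  simp [List.all_eq_true, PySem.Set.mem_ofList, Function.comp]

-- ===== VERDICT (by name: the statement is the Claim_ definition above) =====
theorem chech_valid_lower_spec : Claim_equal_chech_valid_lower := by
  intro path cave _
  unfold Spec_chech_valid_lower
  exact chech_valid_lower_eq path cave
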